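-- pv_equiv track=rewrite | github.com/MoatasimB/LC-solutions | 3834-merge-adjacent-equal-elements/3834. Merge Adjacent Equal Elements.py | mergeAdjacent
-- ===== SOURCE A (Python) =====
-- from typing import List
--
-- def mergeAdjacent(nums: List[int]) -> List[int]:
--
--
--     s = []
--
--     for n in nums:
--         if s and n == s[-1]:
--             s[-1] *= 2
--             while len(s) > 1 and s[-1] == s[-2]:
--                 s.pop()
--                 s[-1] *= 2
--         else:
--             s.append(n)
--
--     return s
-- ===== SOURCE B (Python) =====
-- from typing import List
--
-- def mergeAdjacent(nums: List[int]) -> List[int]: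
--     # Repeated leftmost-scan fixpoint: merge the first adjacent equal pair,
--     # restart from the beginning, until no adjacent equal pair remains.
--     res = list(nums)
--     while True:
--         i = 0
--         merged = False
--         while i + 1 < len(res):
--             if res[i] == res[i + 1]:
--                 res[i] *= 2
--                 del res[i + 1]
--                 merged = True
--                 break
--             i += 1
--         if not merged:
--             return res
-- ===== Notes on version B (the rewrite author's own statement) =====
-- stated objective: alternative
-- what changed: Replaced the single amortized stack pass (cascading pops) by a repeated leftmost-scan fixpoint: find the first adjacent equal pair, merge it in place, and restart the scan until no pair remains.
import Mathlib
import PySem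

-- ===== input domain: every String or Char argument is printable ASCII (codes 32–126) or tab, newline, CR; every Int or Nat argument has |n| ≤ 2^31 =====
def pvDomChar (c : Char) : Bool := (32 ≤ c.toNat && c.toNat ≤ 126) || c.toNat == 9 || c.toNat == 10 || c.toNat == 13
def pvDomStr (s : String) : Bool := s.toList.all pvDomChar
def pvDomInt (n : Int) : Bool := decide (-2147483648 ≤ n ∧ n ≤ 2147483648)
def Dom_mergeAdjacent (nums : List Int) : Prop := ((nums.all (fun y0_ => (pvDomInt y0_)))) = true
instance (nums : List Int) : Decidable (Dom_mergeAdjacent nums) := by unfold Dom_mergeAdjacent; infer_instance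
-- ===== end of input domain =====

-- B replaces A's single stack pass by a repeated leftmost-pair merge fixpoint (alternative algorithm, not faster).

-- ===== PORT A =====
-- the while-loop 'while len(s) > 1 and s[-1] == s[-2]: s.pop(); s[-1] *= 2';
-- the stack is kept reversed (head = Python s[-1]).
def pvCascade (v : Int) (rest : List Int) : List Int :=
  match rest with
  | t :: r => if v = t then pvCascade (2 * v) r else v :: t :: r
  | [] => [v]

-- the body of 'for n in nums' acting on the (reversed) stack
def pvPush (s : List Int) (n : Int) : List Int :=
  match s with
  | t :: r => if n = t then pvCascade (2 * n) r else n :: t :: r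
  | [] => [n]

def mergeAdjacent (nums : List Int) : List Int :=
  (nums.foldl pvPush []).reverse

-- ===== PORT B =====
-- scan for the first adjacent equal pair; merge it if found (inner while loop of Source B)
def pvStep (l : List Int) : Option (List Int) :=
  match l with
  | a :: b :: rest => if a = b then some ((2 * a) :: rest) else (pvStep (b :: rest)).map (a :: ·)
  | _ => none

theorem pvStep_length {l l' : List Int} (h : pvStep l = some l') : l'.length < l.length := by
  induction l generalizing l' with
  | nil => simp [pvStep] at h
  | cons a t ih =>
    match t with
    | [] => simp [pvStep] at h
    | b :: rest =>
      simp only [pvStep] at h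
      split at h
      · cases h; simp
      · cases hm : pvStep (b :: rest) with
        | none => rw [hm] at h; simp at h
        | some m =>
          rw [hm] at h
          cases h
          have := ih hm
          simpa using this

-- outer 'while True' loop of Source B
def pvLoop (l : List Int) : List Int :=
  match h : pvStep l with
  | none => l
  | some l' => pvLoop l'
termination_by l.length
decreasing_by exact pvStep_length h

def mergeAdjacent_alt (nums : List Int) : List Int := pvLoop nums

-- ===== PRECONDITION & SPEC =====
def Spec_mergeAdjacent (nums : List Int) (out : List Int) : Prop := out = mergeAdjacent_alt nums
instance (nums : List Int) (out : List Int) : Decidable (Spec_mergeAdjacent nums out) := by unfold Spec_mergeAdjacent; infer_instance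

-- ===== CLAIM (what is proved, stated in full; the proofs are below) =====
def Claim_equal_mergeAdjacent : Prop := ∀ (nums : List Int), Dom_mergeAdjacent nums → Spec_mergeAdjacent nums (mergeAdjacent nums)

-- ===== LEMMAS AND PROOFS =====

theorem pvPush_eq_cascade (s : List Int) (n : Int) : pvPush s n = pvCascade n s := by
  cases s <;> simp [pvPush, pvCascade]

-- a pair-free list with a non-clashing stack just gets appended
theorem foldl_push_nostep (l : List Int) (s : List Int)
    (hs : pvStep l = none)
    (hhd : ∀ t h, s.head? = some t → l.head? = some h → t ≠ h) :
    l.foldl pvPush s = l.reverse ++ s := by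
  induction l generalizing s with
  | nil => simp
  | cons a t ih =>
    have hpa : pvPush s a = a :: s := by
      cases s with
      | nil => simp [pvPush]
      | cons x r =>
        have : x ≠ a := hhd x a rfl rfl
        simp [pvPush, this.symm]
    match t with
    | [] => simp [hpa]
    | b :: rest =>
      simp only [pvStep] at hs
      split at hs
      · simp at hs
      · rename_i hab
        cases hm : pvStep (b :: rest) with
        | some m => rw [hm] at hs; simp at hs
        | none =>
          have := ih (a :: s) hm (by
            intro t h ht hh
            simp at ht hh
            subst ht; subst hh; exact hab)
          simp only [List.foldl_cons, hpa, this]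
          simp
  
-- merging the leftmost pair does not change the fold, for any non-clashing stack
theorem foldl_push_step (l l' : List Int) (h : pvStep l = some l') (s : List Int)
    (hhd : ∀ t a, s.head? = some t → l.head? = some a → t ≠ a) :
    l.foldl pvPush s = l'.foldl pvPush s := by
  induction l generalizing l' s with
  | nil => simp [pvStep] at h
  | cons a t ih =>
    match t with
    | [] => simp [pvStep] at h
    | b :: rest =>
      have hpa : pvPush s a = a :: s := by
        cases s with
        | nil => simp [pvPush]
        | cons x r =>
          have : x ≠ a := hhd x a rfl rfl
          simp [pvPush, this.symm]
      simp only [pvStep] at h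
      split at h
      · rename_i hab
        subst hab
        cases h
        -- fold (a :: a :: rest) from s  =  fold ((2a) :: rest) from s
        simp only [List.foldl_cons, hpa]
        have h1 : pvPush (a :: s) a = pvCascade (2 * a) s := by simp [pvPush]
        rw [h1, ← pvPush_eq_cascade]
      · rename_i hab
        cases hm : pvStep (b :: rest) with
        | none => rw [hm] at h; simp at h
        | some m =>
          rw [hm] at h
          cases h
          simp only [List.foldl_cons, hpa]
          exact ih m hm (a :: s) (by
            intro t x ht hx
            simp at ht hx
            subst ht; subst hx; exact hab)

theorem mergeAdjacent_eq_loop (l : List Int) : mergeAdjacent l = pvLoop l := by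
  induction l using pvLoop.induct with
  | case1 l h =>
    rw [pvLoop, h]
    unfold mergeAdjacent
    rw [foldl_push_nostep l [] h (by intro t a ht; simp at ht)]
    simp
  | case2 l l' h ih =>
    rw [pvLoop, h]
    unfold mergeAdjacent at *
    rw [foldl_push_step l l' h [] (by intro t a ht; simp at ht)]
    exact ih

-- ===== VERDICT (by name: the statement is the Claim_ definition above) =====
theorem mergeAdjacent_spec : Claim_equal_mergeAdjacent := by
  intro nums _
  unfold Spec_mergeAdjacent
  exact mergeAdjacent_eq_loop nums
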